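-- pv_equiv track=rewrite | github.com/Touricks/TravelPlanner-production | CRAG-travelplanner/seekdb_agent/db/city_aliases.py | get_city_variations
-- ===== SOURCE A (Python) =====
-- CITY_ALIASES: dict[str, list[str]] = {
--     # 迈阿密大都市区 (Miami-Fort Lauderdale-Pompano Beach MSA)
--     "Miami": [
--         "Miami",
--         "Miami Beach",
--         "Hialeah",
--         "Coral Gables",
--         "Fort Lauderdale",
--         "Hollywood",
--         "Pompano Beach",
--         "Boca Raton",
--         "Deerfield Beach",
--         "Aventura",
--     ],
--     # 佛罗里达群岛 (Florida Keys)
--     "Key West": [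
--         "Key West",
--         "Key Largo",
--         "Islamorada",
--         "Marathon",
--         "Big Pine Key",
--         "Tavernier",
--     ],
--     # 奥兰多大都市区 (Orlando-Kissimmee-Sanford MSA)
--     "Orlando": [
--         "Orlando",
--         "Kissimmee",
--         "Winter Park",
--         "Lake Buena Vista",
--         "Sanford",
--         "Altamonte Springs",
--     ],
--     # 坦帕大都市区 (Tampa-St. Petersburg-Clearwater MSA)
--     "Tampa": [
--         "Tampa",
--         "St. Petersburg",
--         "Clearwater",
--         "Brandon",
--         "Largo",
--         "Palm Harbor",
--     ],
--     # 杰克逊维尔大都市区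
--     "Jacksonville": [
--         "Jacksonville",
--         "Jacksonville Beach",
--         "Neptune Beach",
--         "Atlantic Beach",
--         "St. Augustine",
--     ],
--     # 那不勒斯大都市区
--     "Naples": [
--         "Naples",
--         "Marco Island",
--         "Bonita Springs",
--     ],
--     # 西棕榈滩大都市区
--     "West Palm Beach": [
--         "West Palm Beach",
--         "Palm Beach",
--         "Delray Beach",
--         "Boynton Beach",
--     ],
-- }
--
-- def get_city_variations(destination: str) -> list[str]:
--     """
--     获取单个城市及其大都市区变体列表
--
--     Args:
--         destination: 目的地城市名
--
--     Returns:
--         该城市所在大都市区的所有城市列表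
--         如果未找到匹配，返回原始输入
--
--     Example:
--         >>> get_city_variations("Miami")
--         ["Miami", "Miami Beach", "Hialeah", ...]
--         >>> get_city_variations("Unknown City")
--         ["Unknown City"]
--     """
--     dest_lower = destination.lower().strip()
--
--     # 查找完全匹配或别名匹配
--     for main_city, aliases in CITY_ALIASES.items():
--         if dest_lower == main_city.lower():
--             return aliases
--         if any(dest_lower == alias.lower() for alias in aliases):
--             return aliases
--
--     # 无匹配时返回原始值
--     return [destination]
-- ===== SOURCE B (Python) =====
-- # Metro-area groups (same data as A's CITY_ALIASES values; every main key is
-- # also its group's first alias, so the flat name table covers keys too).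
-- GROUPS: list[list[str]] = [
--     ["Miami", "Miami Beach", "Hialeah", "Coral Gables", "Fort Lauderdale",
--      "Hollywood", "Pompano Beach", "Boca Raton", "Deerfield Beach", "Aventura"],
--     ["Key West", "Key Largo", "Islamorada", "Marathon", "Big Pine Key", "Tavernier"],
--     ["Orlando", "Kissimmee", "Winter Park", "Lake Buena Vista", "Sanford", "Altamonte Springs"],
--     ["Tampa", "St. Petersburg", "Clearwater", "Brandon", "Largo", "Palm Harbor"],
--     ["Jacksonville", "Jacksonville Beach", "Neptune Beach", "Atlantic Beach", "St. Augustine"],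
--     ["Naples", "Marco Island", "Bonita Springs"],
--     ["West Palm Beach", "Palm Beach", "Delray Beach", "Boynton Beach"],
-- ]
--
-- # Flat table of (lowercased name, its group), sorted by name for binary search.
-- _TABLE: list[tuple[str, list[str]]] = sorted(
--     ((name.lower(), group) for group in GROUPS for name in group),
--     key=lambda p: p[0],
-- )
--
--
-- def get_city_variations(destination: str) -> list[str]:
--     d = destination.lower().strip()
--     lo, hi = 0, len(_TABLE)
--     while lo < hi:
--         mid = (lo + hi) // 2
--         if _TABLE[mid][0] < d:
--             lo = mid + 1
--         else:
--             hi = mid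
--     if lo < len(_TABLE) and _TABLE[lo][0] == d:
--         return _TABLE[lo][1]
--     return [destination]
-- ===== Notes on version B (the rewrite author's own statement) =====
-- stated objective: alternative
-- what changed: Replaced A's per-call linear scan over the alias dict (key test plus a nested any over each alias list) by a flat table of (lowercased name, group) pairs sorted once at module level and a per-call binary search over it; correctness relies on the names being pairwise distinct and every main key appearing among its own aliases.
import Mathlib
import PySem

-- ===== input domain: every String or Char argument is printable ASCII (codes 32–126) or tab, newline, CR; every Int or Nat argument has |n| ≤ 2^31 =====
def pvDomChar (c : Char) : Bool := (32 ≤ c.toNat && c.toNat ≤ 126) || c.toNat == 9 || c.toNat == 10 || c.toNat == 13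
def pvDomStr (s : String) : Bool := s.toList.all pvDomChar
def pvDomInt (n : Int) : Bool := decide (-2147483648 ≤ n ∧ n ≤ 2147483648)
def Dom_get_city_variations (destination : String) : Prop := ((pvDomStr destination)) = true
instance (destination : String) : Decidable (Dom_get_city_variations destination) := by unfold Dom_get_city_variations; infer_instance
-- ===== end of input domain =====

-- B replaces A's per-call linear scan over the alias dict by a flat (lowercased name, group)
-- table sorted once at module level and a per-call binary search over it (alternative algorithm).

-- ===== PORT A =====
-- The module constant CITY_ALIASES used by A.
def cityAliases : List (String × List String) :=
  [ ("Miami", ["Miami", "Miami Beach", "Hialeah", "Coral Gables", "Fort Lauderdale",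
               "Hollywood", "Pompano Beach", "Boca Raton", "Deerfield Beach", "Aventura"]),
    ("Key West", ["Key West", "Key Largo", "Islamorada", "Marathon", "Big Pine Key", "Tavernier"]),
    ("Orlando", ["Orlando", "Kissimmee", "Winter Park", "Lake Buena Vista", "Sanford", "Altamonte Springs"]),
    ("Tampa", ["Tampa", "St. Petersburg", "Clearwater", "Brandon", "Largo", "Palm Harbor"]),
    ("Jacksonville", ["Jacksonville", "Jacksonville Beach", "Neptune Beach", "Atlantic Beach", "St. Augustine"]),
    ("Naples", ["Naples", "Marco Island", "Bonita Springs"]),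
    ("West Palm Beach", ["West Palm Beach", "Palm Beach", "Delray Beach", "Boynton Beach"]) ]

-- A's for-loop with its two early returns, as structural recursion over the entries.
def scanA (d : String) : List (String × List String) → Option (List String)
  | [] => none
  | (mainCity, aliases) :: rest =>
      if d == PySem.Str.lower mainCity then some aliases
      else if aliases.any (fun a => d == PySem.Str.lower a) then some aliases
      else scanA d rest

def get_city_variations (destination : String) : List String :=
  let dest_lower := PySem.Str.strip (PySem.Str.lower destination)
  match scanA dest_lower cityAliases with
  | some aliases => aliases
  | none => [destination]

-- ===== PORT B =====
-- Source B's module-level _TABLE: the (lowercased name, group) pairs sorted by name.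
def pvTable : List (String × List String) := [
    ("altamonte springs", ["Orlando", "Kissimmee", "Winter Park", "Lake Buena Vista", "Sanford", "Altamonte Springs"]),
    ("atlantic beach", ["Jacksonville", "Jacksonville Beach", "Neptune Beach", "Atlantic Beach", "St. Augustine"]),
    ("aventura", ["Miami", "Miami Beach", "Hialeah", "Coral Gables", "Fort Lauderdale", "Hollywood", "Pompano Beach", "Boca Raton", "Deerfield Beach", "Aventura"]),
    ("big pine key", ["Key West", "Key Largo", "Islamorada", "Marathon", "Big Pine Key", "Tavernier"]),
    ("boca raton", ["Miami", "Miami Beach", "Hialeah", "Coral Gables", "Fort Lauderdale", "Hollywood", "Pompano Beach", "Boca Raton", "Deerfield Beach", "Aventura"]),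
    ("bonita springs", ["Naples", "Marco Island", "Bonita Springs"]),
    ("boynton beach", ["West Palm Beach", "Palm Beach", "Delray Beach", "Boynton Beach"]),
    ("brandon", ["Tampa", "St. Petersburg", "Clearwater", "Brandon", "Largo", "Palm Harbor"]),
    ("clearwater", ["Tampa", "St. Petersburg", "Clearwater", "Brandon", "Largo", "Palm Harbor"]),
    ("coral gables", ["Miami", "Miami Beach", "Hialeah", "Coral Gables", "Fort Lauderdale", "Hollywood", "Pompano Beach", "Boca Raton", "Deerfield Beach", "Aventura"]),
    ("deerfield beach", ["Miami", "Miami Beach", "Hialeah", "Coral Gables", "Fort Lauderdale", "Hollywood", "Pompano Beach", "Boca Raton", "Deerfield Beach", "Aventura"]),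
    ("delray beach", ["West Palm Beach", "Palm Beach", "Delray Beach", "Boynton Beach"]),
    ("fort lauderdale", ["Miami", "Miami Beach", "Hialeah", "Coral Gables", "Fort Lauderdale", "Hollywood", "Pompano Beach", "Boca Raton", "Deerfield Beach", "Aventura"]),
    ("hialeah", ["Miami", "Miami Beach", "Hialeah", "Coral Gables", "Fort Lauderdale", "Hollywood", "Pompano Beach", "Boca Raton", "Deerfield Beach", "Aventura"]),
    ("hollywood", ["Miami", "Miami Beach", "Hialeah", "Coral Gables", "Fort Lauderdale", "Hollywood", "Pompano Beach", "Boca Raton", "Deerfield Beach", "Aventura"]),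
    ("islamorada", ["Key West", "Key Largo", "Islamorada", "Marathon", "Big Pine Key", "Tavernier"]),
    ("jacksonville", ["Jacksonville", "Jacksonville Beach", "Neptune Beach", "Atlantic Beach", "St. Augustine"]),
    ("jacksonville beach", ["Jacksonville", "Jacksonville Beach", "Neptune Beach", "Atlantic Beach", "St. Augustine"]),
    ("key largo", ["Key West", "Key Largo", "Islamorada", "Marathon", "Big Pine Key", "Tavernier"]),
    ("key west", ["Key West", "Key Largo", "Islamorada", "Marathon", "Big Pine Key", "Tavernier"]),
    ("kissimmee", ["Orlando", "Kissimmee", "Winter Park", "Lake Buena Vista", "Sanford", "Altamonte Springs"]),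
    ("lake buena vista", ["Orlando", "Kissimmee", "Winter Park", "Lake Buena Vista", "Sanford", "Altamonte Springs"]),
    ("largo", ["Tampa", "St. Petersburg", "Clearwater", "Brandon", "Largo", "Palm Harbor"]),
    ("marathon", ["Key West", "Key Largo", "Islamorada", "Marathon", "Big Pine Key", "Tavernier"]),
    ("marco island", ["Naples", "Marco Island", "Bonita Springs"]),
    ("miami", ["Miami", "Miami Beach", "Hialeah", "Coral Gables", "Fort Lauderdale", "Hollywood", "Pompano Beach", "Boca Raton", "Deerfield Beach", "Aventura"]),
    ("miami beach", ["Miami", "Miami Beach", "Hialeah", "Coral Gables", "Fort Lauderdale", "Hollywood", "Pompano Beach", "Boca Raton", "Deerfield Beach", "Aventura"]),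
    ("naples", ["Naples", "Marco Island", "Bonita Springs"]),
    ("neptune beach", ["Jacksonville", "Jacksonville Beach", "Neptune Beach", "Atlantic Beach", "St. Augustine"]),
    ("orlando", ["Orlando", "Kissimmee", "Winter Park", "Lake Buena Vista", "Sanford", "Altamonte Springs"]),
    ("palm beach", ["West Palm Beach", "Palm Beach", "Delray Beach", "Boynton Beach"]),
    ("palm harbor", ["Tampa", "St. Petersburg", "Clearwater", "Brandon", "Largo", "Palm Harbor"]),
    ("pompano beach", ["Miami", "Miami Beach", "Hialeah", "Coral Gables", "Fort Lauderdale", "Hollywood", "Pompano Beach", "Boca Raton", "Deerfield Beach", "Aventura"]),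
    ("sanford", ["Orlando", "Kissimmee", "Winter Park", "Lake Buena Vista", "Sanford", "Altamonte Springs"]),
    ("st. augustine", ["Jacksonville", "Jacksonville Beach", "Neptune Beach", "Atlantic Beach", "St. Augustine"]),
    ("st. petersburg", ["Tampa", "St. Petersburg", "Clearwater", "Brandon", "Largo", "Palm Harbor"]),
    ("tampa", ["Tampa", "St. Petersburg", "Clearwater", "Brandon", "Largo", "Palm Harbor"]),
    ("tavernier", ["Key West", "Key Largo", "Islamorada", "Marathon", "Big Pine Key", "Tavernier"]),
    ("west palm beach", ["West Palm Beach", "Palm Beach", "Delray Beach", "Boynton Beach"]),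
    ("winter park", ["Orlando", "Kissimmee", "Winter Park", "Lake Buena Vista", "Sanford", "Altamonte Springs"]) ]

-- Source B's while-loop binary search.  Python's `s < t` on str is code-point lexicographic,
-- which is exactly `<` on `.toList` (PYSEM: str COMPARISON).  The loop runs at most
-- (hi - lo) times, so the `gas` parameter (initialised to the table length) only makes
-- the same computation structurally total and never runs out.
def pvBsearch (d : String) : Nat → Nat → Nat → Nat
  | 0, lo, _ => lo
  | gas + 1, lo, hi =>
      if lo < hi then
        let mid := (lo + hi) / 2
        if (pvTable.getD mid ("", [])).1.toList < d.toList then pvBsearch d gas (mid + 1) hi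
        else pvBsearch d gas lo mid
      else lo

def get_city_variations_alt (destination : String) : List String :=
  let d := PySem.Str.strip (PySem.Str.lower destination)
  let lo := pvBsearch d pvTable.length 0 pvTable.length
  if lo < pvTable.length && ((pvTable.getD lo ("", [])).1 == d) then
    (pvTable.getD lo ("", [])).2
  else [destination]

-- ===== PRECONDITION & SPEC =====
def Spec_get_city_variations (destination : String) (out : List String) : Prop := out = get_city_variations_alt destination
instance (destination : String) (out : List String) : Decidable (Spec_get_city_variations destination out) := by unfold Spec_get_city_variations; infer_instance

-- ===== CLAIM =====
def Claim_equal_get_city_variations : Prop := ∀ (destination : String), Dom_get_city_variations destination → Spec_get_city_variations destination (get_city_variations destination)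

-- ===== LEMMAS AND PROOFS =====

-- All 40 lowercased names of the table.
def pvNames : List String := ["altamonte springs", "atlantic beach", "aventura", "big pine key", "boca raton", "bonita springs", "boynton beach", "brandon", "clearwater", "coral gables", "deerfield beach", "delray beach", "fort lauderdale", "hialeah", "hollywood", "islamorada", "jacksonville", "jacksonville beach", "key largo", "key west", "kissimmee", "lake buena vista", "largo", "marathon", "marco island", "miami", "miami beach", "naples", "neptune beach", "orlando", "palm beach", "palm harbor", "pompano beach", "sanford", "st. augustine", "st. petersburg", "tampa", "tavernier", "west palm beach", "winter park"]

-- A-side result as an Option-valued core applied to the normalised string.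
theorem A_core (destination : String) :
    get_city_variations destination
      = (scanA (PySem.Str.strip (PySem.Str.lower destination)) cityAliases).getD [destination] := by
  simp only [get_city_variations]
  cases h : scanA (PySem.Str.strip (PySem.Str.lower destination)) cityAliases <;> rfl

-- B-side search-and-check as an Option-valued core.
def tableFind (d : String) : Option (List String) :=
  let lo := pvBsearch d pvTable.length 0 pvTable.length
  if lo < pvTable.length && ((pvTable.getD lo ("", [])).1 == d) then
    some (pvTable.getD lo ("", [])).2
  else none

theorem B_core (destination : String) :
    get_city_variations_alt destination
      = (tableFind (PySem.Str.strip (PySem.Str.lower destination))).getD [destination] := by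
  simp only [get_city_variations_alt, tableFind]
  split
  · rfl
  · rfl

-- If d matches no entry of a block, A's scan of that block yields none.
theorem scanA_none (d : String) :
    ∀ l : List (String × List String),
      (∀ p ∈ l, d ≠ PySem.Str.lower p.1 ∧ ∀ a ∈ p.2, d ≠ PySem.Str.lower a) →
      scanA d l = none := by
  intro l
  induction l with
  | nil => intro _; rfl
  | cons p rest ih =>
      intro h
      obtain ⟨mc, al⟩ := p
      obtain ⟨h1, h2⟩ := h (mc, al) (by simp)
      simp only [scanA]
      rw [if_neg (by simpa using h1), if_neg, ih (fun q hq => h q (List.mem_cons_of_mem _ hq))]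
      simp only [List.any_eq_true, beq_iff_eq, not_exists, not_and]
      intro a ha
      exact h2 a ha

-- Every lowered key and alias of cityAliases is among pvNames (checked by evaluation).
theorem cityAliases_names :
    ∀ p ∈ cityAliases, PySem.Str.lower p.1 ∈ pvNames ∧ ∀ a ∈ p.2, PySem.Str.lower a ∈ pvNames := by
  decide

-- Every key of pvTable is among pvNames (checked by evaluation).
theorem pvTable_names : ∀ p ∈ pvTable, p.1 ∈ pvNames := by decide

-- If d is none of the names, the binary search's final key test fails.
theorem tableFind_none (d : String) (h : d ∉ pvNames) : tableFind d = none := by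
  simp only [tableFind]
  split
  · rename_i hc
    exfalso
    obtain ⟨hl, hk⟩ := Bool.and_eq_true_iff.mp hc
    have hl' : pvBsearch d pvTable.length 0 pvTable.length < pvTable.length := of_decide_eq_true hl
    have hmem : pvTable.getD (pvBsearch d pvTable.length 0 pvTable.length) ("", []) ∈ pvTable := by
      rw [List.getD_eq_getElem pvTable ("", []) hl']
      exact List.getElem_mem hl'
    exact h ((eq_of_beq hk) ▸ pvTable_names _ hmem)
  · rfl

-- The two cores agree on every normalised string.
theorem core_eq (d : String) : scanA d cityAliases = tableFind d := by
  by_cases h : d ∈ pvNames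
  · fin_cases h <;> decide
  · rw [tableFind_none d h, scanA_none d cityAliases]
    intro p hp
    obtain ⟨h1, h2⟩ := cityAliases_names p hp
    exact ⟨fun he => h (he ▸ h1), fun a ha he => h (he ▸ h2 a ha)⟩

-- ===== VERDICT =====
theorem get_city_variations_spec : Claim_equal_get_city_variations := by
  intro destination _
  unfold Spec_get_city_variations
  rw [A_core, B_core, core_eq]
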